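-- pv_equiv track=rewrite | github.com/cjmcgill/chemprop | active_learning_wrapper.py | print_max_duplicates
-- ===== SOURCE A (Python) =====
-- def print_max_duplicates(lst):
--     flat_list = [item for sublist in lst for item in sublist]
--     frequency = {}
--     max_frequency = 0
--
--     # Count the frequency of each value
--     for value in flat_list:
--         if value in frequency:
--             frequency[value] += 1
--         else:
--             frequency[value] = 1
--
--         # Update max_frequency if necessary
--         if frequency[value] > max_frequency:
--             max_frequency = frequency[value]
--
--     return max_frequency
-- ===== SOURCE B (Python) =====
-- def print_max_duplicates(lst):
--     # Distinct-value elimination: repeatedly take the first remaining value,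
--     # get its multiplicity as the length drop after filtering it out, and
--     # continue on the filtered remainder. No frequency table at all.
--     flat = [v for sub in lst for v in sub]
--     best = 0
--     while flat:
--         v = flat[0]
--         rest = [x for x in flat if x != v]
--         c = len(flat) - len(rest)
--         if c > best:
--             best = c
--         flat = rest
--     return best
-- ===== Notes on version B (the rewrite author's own statement) =====
-- stated objective: alternative
-- what changed: B replaces the frequency dict entirely with distinct-value elimination: it repeatedly takes the first remaining value, obtains its multiplicity as the length drop when filtering it out of the working list, keeps the best multiplicity seen, and loops on the filtered remainder.
import Mathlib
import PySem

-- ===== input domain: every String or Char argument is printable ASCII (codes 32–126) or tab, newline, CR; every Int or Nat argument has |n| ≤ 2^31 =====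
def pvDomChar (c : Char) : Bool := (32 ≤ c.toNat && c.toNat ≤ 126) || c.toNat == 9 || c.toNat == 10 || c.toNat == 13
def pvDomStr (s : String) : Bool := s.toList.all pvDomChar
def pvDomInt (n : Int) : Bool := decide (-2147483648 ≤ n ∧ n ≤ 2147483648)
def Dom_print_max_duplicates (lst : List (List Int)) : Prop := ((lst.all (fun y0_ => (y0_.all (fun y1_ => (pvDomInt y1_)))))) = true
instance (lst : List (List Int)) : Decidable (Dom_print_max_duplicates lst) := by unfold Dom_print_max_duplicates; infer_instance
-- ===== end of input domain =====

-- B drops the frequency dict: it repeatedly takes the first remaining value, reads its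
-- multiplicity off the length drop when filtering it out, and loops on the remainder
-- (distinct-value elimination). Alternative algorithm, not claimed faster.

-- ===== PORT A =====
def print_max_duplicates (lst : List (List Int)) : Int :=
  let flat_list := lst.flatten
  (flat_list.foldl
    (fun (st : PySem.Dict Int Int × Int) value =>
      let frequency :=
        if st.1.contains value then st.1.insert value (st.1.getD value 0 + 1)
        else st.1.insert value 1
      (frequency,
        if frequency.getD value 0 > st.2 then frequency.getD value 0 else st.2))
    ((PySem.Dict.empty : PySem.Dict Int Int), 0)).2

-- ===== PORT B =====
-- the while loop of Source B, as a tail recursion on the shrinking working list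
def pmdGo (flat : List Int) (best : Int) : Int :=
  match flat with
  | [] => best
  | v :: t =>
    let rest := (v :: t).filter (fun x => decide (x ≠ v))
    let c : Int := ((v :: t).length : Int) - (rest.length : Int)
    pmdGo rest (if c > best then c else best)
termination_by flat.length
decreasing_by
  simp only [List.length_cons]
  calc ((v :: t).filter (fun x => decide (x ≠ v))).length
      = (t.filter (fun x => decide (x ≠ v))).length := by simp
    _ ≤ t.length := List.length_filter_le _ _
    _ < t.length + 1 := Nat.lt_succ_self _

def print_max_duplicates_alt (lst : List (List Int)) : Int :=
  pmdGo lst.flatten 0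

-- ===== PRECONDITION & SPEC =====
def Spec_print_max_duplicates (lst : List (List Int)) (out : Int) : Prop := out = print_max_duplicates_alt lst
instance (lst : List (List Int)) (out : Int) : Decidable (Spec_print_max_duplicates lst out) := by unfold Spec_print_max_duplicates; infer_instance

-- ===== CLAIM (what is proved, stated in full; the proofs are below) =====
def Claim_equal_print_max_duplicates : Prop := ∀ (lst : List (List Int)), Dom_print_max_duplicates lst → Spec_print_max_duplicates lst (print_max_duplicates lst)

-- ===== LEMMAS AND PROOFS =====

-- r is "the maximal multiplicity in l (0 for empty l)": it bounds every count and is attained (or l is empty and r = 0).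
def pvMaxSpec (l : List Int) (r : Int) : Prop :=
  (∀ v ∈ l, (l.count v : Int) ≤ r) ∧ ((l = [] ∧ r = 0) ∨ ∃ v ∈ l, r = (l.count v : Int))

theorem pvMaxSpec_unique {l : List Int} {r₁ r₂ : Int}
    (h₁ : pvMaxSpec l r₁) (h₂ : pvMaxSpec l r₂) : r₁ = r₂ := by
  obtain ⟨b₁, e₁⟩ := h₁; obtain ⟨b₂, e₂⟩ := h₂
  rcases e₁ with ⟨hl, hr⟩ | ⟨v, hv, hr⟩ <;> rcases e₂ with ⟨hl', hr'⟩ | ⟨w, hw, hr'⟩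
  · omega
  · subst hl; simp at hw
  · subst hl'; simp at hv
  · have h1 := b₂ v hv; have h2 := b₁ w hw; omega

theorem counter_snoc_insert (l : List Int) (v : Int) :
    (PySem.Dict.counter l).insert v ((PySem.Dict.counter l).getD v 0 + 1)
      = PySem.Dict.counter (l ++ [v]) := by
  rw [← PySem.Dict.foldl_insert_getD_add_one_eq_counter l,
      ← PySem.Dict.foldl_insert_getD_add_one_eq_counter (l ++ [v]),
      List.foldl_append]
  simp [List.foldl]

theorem foldA_char (l : List Int) :
    (l.foldl
      (fun (st : PySem.Dict Int Int × Int) value =>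
        let frequency :=
          if st.1.contains value then st.1.insert value (st.1.getD value 0 + 1)
          else st.1.insert value 1
        (frequency,
          if frequency.getD value 0 > st.2 then frequency.getD value 0 else st.2))
      ((PySem.Dict.empty : PySem.Dict Int Int), 0)).1 = PySem.Dict.counter l
    ∧ pvMaxSpec l
      (l.foldl
        (fun (st : PySem.Dict Int Int × Int) value =>
          let frequency :=
            if st.1.contains value then st.1.insert value (st.1.getD value 0 + 1)
            else st.1.insert value 1
          (frequency,
            if frequency.getD value 0 > st.2 then frequency.getD value 0 else st.2))
        ((PySem.Dict.empty : PySem.Dict Int Int), 0)).2 := by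
  induction l using List.reverseRecOn with
  | nil => exact ⟨rfl, by simp [pvMaxSpec]⟩
  | append_singleton l v ih =>
    obtain ⟨hdict, hb, he⟩ := ih
    rw [List.foldl_append] at *
    set st := (l.foldl
      (fun (st : PySem.Dict Int Int × Int) value =>
        let frequency :=
          if st.1.contains value then st.1.insert value (st.1.getD value 0 + 1)
          else st.1.insert value 1
        (frequency,
          if frequency.getD value 0 > st.2 then frequency.getD value 0 else st.2))
      ((PySem.Dict.empty : PySem.Dict Int Int), 0)) with hst
    have hfreq : (if st.1.contains v then st.1.insert v (st.1.getD v 0 + 1)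
        else st.1.insert v 1) = PySem.Dict.counter (l ++ [v]) := by
      rw [hdict]
      by_cases hc : (PySem.Dict.counter l).contains v = true
      · rw [if_pos hc, counter_snoc_insert]
      · rw [if_neg hc]
        have hzero : (PySem.Dict.counter l).getD v 0 = 0 := by
          rw [PySem.Dict.getD_counter]
          have : ¬ v ∈ l := by
            intro hm
            exact hc (by rw [PySem.Dict.contains_counter]; exact List.contains_iff_mem.mpr hm)
          simp [List.count_eq_zero_of_not_mem this]
        rw [← counter_snoc_insert, hzero]
        norm_num
    have hcnt : (PySem.Dict.counter (l ++ [v])).getD v 0 = ((l.count v : Int) + 1) := by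
      rw [PySem.Dict.getD_counter]
      simp [List.count_append]
    simp only [List.foldl_cons, List.foldl_nil, hfreq, hcnt]
    refine ⟨trivial, ?_, ?_⟩
    · intro w hw
      by_cases hwv : w = v
      · subst hwv
        have : ((l ++ [w]).count w : Int) = (l.count w : Int) + 1 := by
          simp [List.count_append]
        rw [this]
        split <;> omega
      · have hwl : w ∈ l := by
          rcases List.mem_append.mp hw with h | h
          · exact h
          · exact absurd (List.mem_singleton.mp h) hwv
        have : ((l ++ [v]).count w : Int) = (l.count w : Int) := by
          simp [List.count_append, List.count_singleton]
          exact fun h => hwv h.symm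
        rw [this]
        have := hb w hwl
        split <;> omega
    · by_cases hgt : (l.count v : Int) + 1 > st.2
      · refine Or.inr ⟨v, by simp, ?_⟩
        rw [if_pos hgt]
        simp [List.count_append]
      · rw [if_neg hgt]
        rcases he with ⟨hl0, hr0⟩ | ⟨w, hw, hr⟩
        · exfalso; subst hl0; simp at hgt; omega
        · by_cases hwv : w = v
          · exfalso
            subst hwv
            omega
          · refine Or.inr ⟨w, List.mem_append.mpr (Or.inl hw), ?_⟩
            rw [hr]
            simp [List.count_append, List.count_singleton]
            exact fun h => hwv h.symm

-- invariant of B's loop: pmdGo xs best returns max(best, maximal multiplicity in xs)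
def pvGoSpec (xs : List Int) (best r : Int) : Prop :=
  best ≤ r ∧ (∀ w ∈ xs, (xs.count w : Int) ≤ r) ∧ (r = best ∨ ∃ w ∈ xs, r = (xs.count w : Int))

theorem count_filter_ne (xs : List Int) (v w : Int) (hwv : w ≠ v) :
    (xs.filter (fun x => decide (x ≠ v))).count w = xs.count w := by
  rw [List.count_filter]
  simp [hwv]

theorem pmdGo_spec_aux : ∀ (n : Nat) (xs : List Int) (best : Int), xs.length ≤ n →
    pvGoSpec xs best (pmdGo xs best) := by
  intro n
  induction n with
  | zero =>
    intro xs best h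
    have hxs : xs = [] := List.eq_nil_of_length_eq_zero (Nat.le_zero.mp h)
    subst hxs
    rw [pmdGo]
    exact ⟨le_refl _, by simp, Or.inl rfl⟩
  | succ n ihn =>
    intro xs best h
    match xs with
    | [] =>
      rw [pmdGo]
      exact ⟨le_refl _, by simp, Or.inl rfl⟩
    | v :: t =>
      set rest := (v :: t).filter (fun x => decide (x ≠ v)) with hrest
      set c : Int := ((v :: t).length : Int) - (rest.length : Int) with hc
      have hlen : rest.length ≤ n := by
        have : rest.length ≤ t.length := by
          rw [hrest]
          calc ((v :: t).filter (fun x => decide (x ≠ v))).length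
              = (t.filter (fun x => decide (x ≠ v))).length := by simp
            _ ≤ t.length := List.length_filter_le _ _
        simp only [List.length_cons] at h
        omega
      obtain ⟨hle, hbnd, hatt⟩ := ihn rest (if c > best then c else best) hlen
      have hgoal : pmdGo (v :: t) best = pmdGo rest (if c > best then c else best) := by
        rw [pmdGo]
      rw [hgoal]
      set r := pmdGo rest (if c > best then c else best) with hr
      have hvrest : v ∉ rest := by simp [hrest]
      have hcount : c = (((v :: t).count v : Nat) : Int) := by
        have hsplit : (v :: t).length
            = ((v :: t).filter (fun x => decide (x ≠ v))).length + (v :: t).count v := by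
          have h0 := List.length_eq_countP_add_countP (p := fun x => decide (x ≠ v)) (l := v :: t)
          rw [List.countP_eq_length_filter] at h0
          rw [h0]
          congr 1
          rw [List.count_eq_countP]
          apply List.countP_congr
          intro a _
          by_cases ha : a = v <;> simp [ha]
        rw [hc, hrest]
        omega
      have hcpos : (1 : Int) ≤ c := by
        rw [hcount]
        have : 1 ≤ (v :: t).count v := List.one_le_count_iff.mpr (List.mem_cons_self)
        omega
      refine ⟨by split at hle <;> omega, ?_, ?_⟩
      · intro w hw
        by_cases hwv : w = v
        · subst hwv
          rw [← hcount]
          split at hle <;> omega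
        · have hwrest : w ∈ rest := by
            rw [hrest]
            simp only [List.mem_filter]
            exact ⟨hw, by simp [hwv]⟩
          have := hbnd w hwrest
          rw [hrest, count_filter_ne _ _ _ hwv] at this
          exact this
      · rcases hatt with hrb | ⟨w, hw, hwc⟩
        · by_cases hgt : c > best
          · rw [if_pos hgt] at hrb
            exact Or.inr ⟨v, List.mem_cons_self, by rw [hrb, hcount]⟩
          · rw [if_neg hgt] at hrb
            exact Or.inl hrb
        · have hwv : w ≠ v := by
            intro heq; exact hvrest (heq ▸ hw)
          have hwmem : w ∈ v :: t := by
            rw [hrest] at hw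
            exact (List.mem_filter.mp hw).1
          refine Or.inr ⟨w, hwmem, ?_⟩
          rw [hwc, hrest, count_filter_ne _ _ _ hwv]

theorem pmdGo_maxSpec (xs : List Int) : pvMaxSpec xs (pmdGo xs 0) := by
  obtain ⟨hle, hbnd, hatt⟩ := pmdGo_spec_aux xs.length xs 0 (le_refl _)
  refine ⟨hbnd, ?_⟩
  rcases hatt with h0 | hex
  · rcases List.eq_nil_or_concat xs with hnil | ⟨l', v, hne⟩
    · exact Or.inl ⟨hnil, h0⟩
    · exfalso
      have hv : v ∈ xs := by subst hne; simp
      have h1 : 1 ≤ xs.count v := List.one_le_count_iff.mpr hv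
      have := hbnd v hv
      omega
  · exact Or.inr hex

-- ===== VERDICT (by name: the statement is the Claim_ definition above) =====
theorem print_max_duplicates_spec : Claim_equal_print_max_duplicates := by
  intro lst _
  show print_max_duplicates lst = print_max_duplicates_alt lst
  exact pvMaxSpec_unique (foldA_char lst.flatten).2 (pmdGo_maxSpec lst.flatten)
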